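-- pv_equiv track=rewrite | github.com/debbie-drg/advent-of-code-2023 | Day03/day03.py | valid_positions
-- ===== SOURCE A (Python) =====
-- def valid_positions(symbol_list: list[int]) -> list[set[int]]:
--     row_positions = []
--     for index, line in enumerate(symbol_list):
--         new_line = set()
--         for element in line:
--             new_line.update({element - 1, element, element + 1})
--         row_positions.append(new_line)
--     final_positions = []
--     for index in range(len(row_positions)):
--         line = set()
--         line.update(row_positions[index])
--         if index > 0:
--             line.update(row_positions[index - 1])
--         if index < len(row_positions) - 1:
--             line.update(row_positions[index + 1])
--         final_positions.append(line)
--     return final_positions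
-- ===== SOURCE B (Python) =====
-- def valid_positions(symbol_list: list[int]) -> list[set[int]]:
--     n = len(symbol_list)
--     final = []
--     for i, row in enumerate(symbol_list):
--         window = list(row)
--         if i > 0:
--             window = window + symbol_list[i - 1]
--         if i + 1 < n:
--             window = window + symbol_list[i + 1]
--         final.append({e + d for e in window for d in (-1, 0, 1)})
--     return final
-- ===== Notes on version B (the rewrite author's own statement) =====
-- stated objective: simpler
-- what changed: One pass instead of two: the intermediate list of per-row expanded sets is dropped; each output row is built directly by expanding the concatenation of the row with its neighbor rows via a set comprehension.
import Mathlib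
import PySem

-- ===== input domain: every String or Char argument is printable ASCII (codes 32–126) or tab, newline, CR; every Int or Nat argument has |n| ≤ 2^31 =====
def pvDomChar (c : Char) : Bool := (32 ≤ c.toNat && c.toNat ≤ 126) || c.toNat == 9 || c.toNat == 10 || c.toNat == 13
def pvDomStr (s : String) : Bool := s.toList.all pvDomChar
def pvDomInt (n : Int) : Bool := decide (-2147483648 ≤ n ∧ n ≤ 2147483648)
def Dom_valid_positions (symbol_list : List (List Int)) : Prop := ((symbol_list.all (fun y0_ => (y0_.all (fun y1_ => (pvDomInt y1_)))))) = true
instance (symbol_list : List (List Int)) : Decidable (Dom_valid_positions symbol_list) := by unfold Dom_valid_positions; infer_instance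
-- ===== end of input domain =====

-- B drops A's intermediate list of per-row expanded sets: one pass in which each output row is
-- the expansion of the concatenation of the row with its neighbor rows (objective: simpler).
-- Return values are Python sets of ints, modelled as PySem.Set (distinct elements, insertion order).

-- ===== PORT A =====
def valid_positions (symbol_list : List (List Int)) : List (List Int) :=
  let row_positions : List (List Int) :=
    symbol_list.foldl (fun acc line =>
      let new_line := line.foldl
        (fun nl element => PySem.Set.update nl (PySem.Set.ofList [element - 1, element, element + 1]))
        PySem.Set.empty
      acc ++ [new_line]) []
  (PySem.List.pyRange 0 (PySem.List.len row_positions) 1).foldl (fun acc index =>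
    let line := PySem.Set.update PySem.Set.empty (PySem.List.pyGetD row_positions index [])
    let line := if index > 0 then PySem.Set.update line (PySem.List.pyGetD row_positions (index - 1) []) else line
    let line := if index < PySem.List.len row_positions - 1 then PySem.Set.update line (PySem.List.pyGetD row_positions (index + 1) []) else line
    acc ++ [line]) []

-- ===== PORT B =====
def valid_positions_alt (symbol_list : List (List Int)) : List (List Int) :=
  let n := PySem.List.len symbol_list
  (PySem.List.enumerate symbol_list).foldl (fun final p =>
    let i := p.1
    let window := p.2
    let window := if i > 0 then window ++ PySem.List.pyGetD symbol_list (i - 1) [] else window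
    let window := if i + 1 < n then window ++ PySem.List.pyGetD symbol_list (i + 1) [] else window
    final ++ [PySem.Set.ofList (window.flatMap (fun e => ([(-1 : Int), 0, 1]).map (fun d => e + d)))]) []

-- ===== PRECONDITION & SPEC =====
def Spec_valid_positions (symbol_list : List (List Int)) (out : List (List Int)) : Prop := out = valid_positions_alt symbol_list
instance (symbol_list : List (List Int)) (out : List (List Int)) : Decidable (Spec_valid_positions symbol_list out) := by unfold Spec_valid_positions; infer_instance

-- ===== CLAIM (what is proved, stated in full; the proofs are below) =====
def Claim_equal_valid_positions : Prop := ∀ (symbol_list : List (List Int)), Dom_valid_positions symbol_list → Spec_valid_positions symbol_list (valid_positions symbol_list)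

-- ===== LEMMAS AND PROOFS =====
-- pvTr e models the triple {e-1, e, e+1}; pvMid is the common normal form of both ports:
-- per index k, the set of the flattened triples of row k and its neighbor rows.

def pvTr (e : Int) : List Int := [e - 1, e, e + 1]

def pvExp (line : List Int) : List Int := PySem.Set.ofList (line.flatMap pvTr)

def pvWin (sl : List (List Int)) (k : Nat) : List Int :=
  sl.getD k [] ++ (if 0 < k then sl.getD (k - 1) [] else []) ++
    (if k + 1 < sl.length then sl.getD (k + 1) [] else [])

def pvMid (sl : List (List Int)) : List (List Int) :=
  (List.range sl.length).map (fun k => PySem.Set.ofList ((pvWin sl k).flatMap pvTr))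

theorem pv_update_ofList (s xs : List Int) :
    PySem.Set.update s (PySem.Set.ofList xs) = PySem.Set.update s xs := by
  rw [PySem.Set.update_eq_append_filter, PySem.Set.update_eq_append_filter,
    PySem.Set.ofList_ofList]

theorem pv_inner (line : List Int) (s : List Int) :
    line.foldl (fun nl e => PySem.Set.update nl (PySem.Set.ofList [e - 1, e, e + 1])) s
      = PySem.Set.update s (line.flatMap pvTr) := by
  induction line generalizing s with
  | nil => simp [PySem.Set.update_nil]
  | cons a l ih =>
    rw [List.foldl_cons, ih, pv_update_ofList, List.flatMap_cons,
      PySem.Set.update_append, pvTr]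

theorem pv_getD_map_exp (sl : List (List Int)) (i : Int) :
    PySem.List.pyGetD (sl.map pvExp) i [] = pvExp (PySem.List.pyGetD sl i []) :=
  PySem.List.pyGetD_map pvExp sl i []

theorem pv_upd_empty (a : List Int) :
    PySem.Set.update PySem.Set.empty (pvExp a) = PySem.Set.ofList (a.flatMap pvTr) := by
  show PySem.Set.update [] (pvExp a) = _
  rw [PySem.Set.update_nil_left, pvExp, PySem.Set.ofList_ofList]

theorem pv_upd_step (x b : List Int) :
    PySem.Set.update (PySem.Set.ofList x) (pvExp b) = PySem.Set.ofList (x ++ b.flatMap pvTr) := by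
  rw [pvExp, pv_update_ofList, PySem.Set.ofList_append]

theorem pvA_eq_mid (sl : List (List Int)) : valid_positions sl = pvMid sl := by
  simp only [valid_positions]
  rw [show (fun (acc : List (List Int)) (line : List Int) => acc ++
      [line.foldl (fun nl element => PySem.Set.update nl
        (PySem.Set.ofList [element - 1, element, element + 1])) PySem.Set.empty])
      = (fun acc line => acc ++ [pvExp line]) from by
        funext acc line
        rw [pv_inner]
        show acc ++ [PySem.Set.update [] _] = _
        rw [PySem.Set.update_nil_left]; rfl]
  rw [PySem.List.foldl_append_singleton_eq_map (f := pvExp)]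
  simp only [List.nil_append, PySem.List.len_eq, List.length_map]
  rw [PySem.List.pyRange_zero_natCast]
  rw [PySem.List.foldl_append_singleton_eq_map]
  simp only [List.nil_append, List.map_map, pvMid]
  apply List.map_congr_left
  intro k hk
  rw [List.mem_range] at hk
  simp only [Function.comp]
  rw [pv_getD_map_exp, PySem.List.pyGetD_natCast, pvWin]
  by_cases hk0 : 0 < k
  · rw [if_pos (show (0:Int) < (k:Int) by exact_mod_cast hk0), if_pos hk0,
      show ((k:Int) - 1) = ((k - 1 : Nat) : Int) by omega,
      pv_getD_map_exp, PySem.List.pyGetD_natCast]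
    by_cases hk1 : k + 1 < sl.length
    · rw [if_pos (show (k:Int) < (sl.length : Int) - 1 by omega), if_pos hk1,
        show ((k:Int) + 1) = ((k + 1 : Nat) : Int) by omega,
        pv_getD_map_exp, PySem.List.pyGetD_natCast,
        pv_upd_empty, pv_upd_step, pv_upd_step]
      simp [List.flatMap_append]
    · rw [if_neg (show ¬ ((k:Int) < (sl.length : Int) - 1) by omega), if_neg hk1,
        pv_upd_empty, pv_upd_step]
      simp [List.flatMap_append]
  · rw [if_neg (show ¬ ((0:Int) < (k:Int)) by exact_mod_cast hk0), if_neg hk0,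
      pv_upd_empty]
    by_cases hk1 : k + 1 < sl.length
    · rw [if_pos (show (k:Int) < (sl.length : Int) - 1 by omega), if_pos hk1,
        show ((k:Int) + 1) = ((k + 1 : Nat) : Int) by omega,
        pv_getD_map_exp, PySem.List.pyGetD_natCast, pv_upd_step]
      simp [List.flatMap_append]
    · rw [if_neg (show ¬ ((k:Int) < (sl.length : Int) - 1) by omega), if_neg hk1]
      simp

theorem pvB_eq_mid (sl : List (List Int)) : valid_positions_alt sl = pvMid sl := by
  simp only [valid_positions_alt]
  rw [PySem.List.enumerate_eq_map_pyRange sl []]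
  rw [List.foldl_map]
  simp only []
  rw [PySem.List.foldl_append_singleton_eq_map]
  simp only [List.nil_append, PySem.List.len_eq]
  rw [PySem.List.pyRange_zero_natCast]
  simp only [List.map_map, pvMid]
  apply List.map_congr_left
  intro k hk
  rw [List.mem_range] at hk
  simp only [Function.comp]
  rw [show (fun e : Int => List.map (fun d => e + d) [(-1 : Int), 0, 1]) = pvTr from by
    funext e
    show [e + -1, e + 0, e + 1] = [e - 1, e, e + 1]
    simp [sub_eq_add_neg]]
  rw [PySem.List.pyGetD_natCast, pvWin]
  by_cases hk0 : 0 < k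
  · rw [if_pos (show (0:Int) < (k:Int) by exact_mod_cast hk0), if_pos hk0,
      show ((k:Int) - 1) = ((k - 1 : Nat) : Int) by omega, PySem.List.pyGetD_natCast]
    by_cases hk1 : k + 1 < sl.length
    · rw [if_pos (show (k:Int) + 1 < (sl.length : Int) by omega), if_pos hk1,
        show ((k:Int) + 1) = ((k + 1 : Nat) : Int) by omega, PySem.List.pyGetD_natCast]
    · rw [if_neg (show ¬ ((k:Int) + 1 < (sl.length : Int)) by omega), if_neg hk1]
      simp
  · rw [if_neg (show ¬ ((0:Int) < (k:Int)) by exact_mod_cast hk0), if_neg hk0]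
    by_cases hk1 : k + 1 < sl.length
    · rw [if_pos (show (k:Int) + 1 < (sl.length : Int) by omega), if_pos hk1,
        show ((k:Int) + 1) = ((k + 1 : Nat) : Int) by omega, PySem.List.pyGetD_natCast]
      simp
    · rw [if_neg (show ¬ ((k:Int) + 1 < (sl.length : Int)) by omega), if_neg hk1]
      simp

-- ===== VERDICT (by name: the statement is the Claim_ definition above) =====
theorem valid_positions_spec : Claim_equal_valid_positions := by
  intro symbol_list _
  unfold Spec_valid_positions
  rw [pvA_eq_mid, pvB_eq_mid]
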